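-- pv_equiv track=rewrite | github.com/oovac/Kosmos | examples/01_biology_metabolic_pathways.py | extract_enzyme_name
-- ===== SOURCE A (Python) =====
-- def extract_enzyme_name(text: str) -> str:
--     """
--     Extract enzyme name from text (simplified).
--
--     Args:
--         text: Text containing enzyme name
--
--     Returns:
--         Extracted enzyme name or 'Unknown'
--     """
--     # This is a simplified version - in practice, use NLP or regex
--     keywords = ['kinase', 'synthase', 'dehydrogenase', 'isomerase', 'aldolase']
--     for keyword in keywords:
--         if keyword in text.lower():
--             # Extract surrounding words
--             words = text.split()
--             for i, word in enumerate(words):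
--                 if keyword in word.lower() and i > 0:
--                     return f"{words[i-1]} {word}"
--     return "Unknown"
-- ===== SOURCE B (Python) =====
-- def extract_enzyme_name(text: str) -> str:
--     """Index-first re-implementation: one pass over the words builds a
--     keyword -> earliest index (>0) table, then one priority-ordered pass
--     over the keywords picks the answer."""
--     keywords = ['kinase', 'synthase', 'dehydrogenase', 'isomerase', 'aldolase']
--     words = text.split()
--     first = {}
--     for i, word in enumerate(words):
--         if i == 0:
--             continue
--         wl = word.lower()
--         for kw in keywords:
--             if kw not in first and kw in wl:
--                 first[kw] = i
--     for kw in keywords: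
--         if kw in first:
--             i = first[kw]
--             return f"{words[i-1]} {words[i]}"
--     return "Unknown"
-- ===== Notes on version B (the rewrite author's own statement) =====
-- stated objective: alternative
-- what changed: Instead of rescanning the full text and its word list once per keyword, B splits once, builds in a single pass over the words a dict mapping each keyword to the earliest index i>0 whose word contains it, then picks the first keyword (in priority order) present in the dict.
import Mathlib
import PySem

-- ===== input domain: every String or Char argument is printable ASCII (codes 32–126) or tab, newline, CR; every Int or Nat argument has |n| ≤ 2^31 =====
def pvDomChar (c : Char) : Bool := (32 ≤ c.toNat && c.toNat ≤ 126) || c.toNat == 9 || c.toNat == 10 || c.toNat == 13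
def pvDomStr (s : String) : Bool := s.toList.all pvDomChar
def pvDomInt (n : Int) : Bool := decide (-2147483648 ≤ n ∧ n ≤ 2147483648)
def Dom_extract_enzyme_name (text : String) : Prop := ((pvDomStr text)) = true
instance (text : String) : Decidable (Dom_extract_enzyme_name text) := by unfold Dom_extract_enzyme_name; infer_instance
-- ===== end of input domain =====

-- B replaces A's per-keyword rescans of the text by one indexing pass over the words
-- followed by a priority-ordered lookup; equivalence is proved on all inputs (A is total).

-- ===== PORT A =====
def pvKeywordsA : List String := ["kinase", "synthase", "dehydrogenase", "isomerase", "aldolase"]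

-- inner loop 'for i, word in enumerate(words): if keyword in word.lower() and i > 0: return …'
-- (words[i-1] is always in range here since 0 < i < len words, so pyGetD with "" is exact)
def pvInnerA (kw : String) (words : List String) : List (Int × String) → Option String
  | [] => none
  | (i, word) :: rest =>
      if PySem.Str.isIn kw (PySem.Str.lower word) && decide (0 < i) then
        some (PySem.List.pyGetD words (i - 1) "" ++ " " ++ word)
      else pvInnerA kw words rest

def pvLoopA (text : String) : List String → String
  | [] => "Unknown"
  | kw :: rest =>
      if PySem.Str.isIn kw (PySem.Str.lower text) then
        match pvInnerA kw (PySem.Str.split₀ text)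
            (PySem.List.enumerate (PySem.Str.split₀ text) 0) with
        | some r => r
        | none => pvLoopA text rest
      else pvLoopA text rest

def extract_enzyme_name (text : String) : String := pvLoopA text pvKeywordsA

-- ===== PORT B =====
def pvKeywordsB : List String := ["kinase", "synthase", "dehydrogenase", "isomerase", "aldolase"]

-- body of B's indexing loop for one (i, word) pair: 'if i == 0: continue' then the keyword loop
def pvStepB (first : PySem.Dict String Int) (p : Int × String) : PySem.Dict String Int :=
  if p.1 == 0 then first
  else pvKeywordsB.foldl
    (fun d kw =>
      if !d.contains kw && PySem.Str.isIn kw (PySem.Str.lower p.2) then d.insert kw p.1 else d)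
    first

def pvBuildB (words : List String) : PySem.Dict String Int :=
  (PySem.List.enumerate words 0).foldl pvStepB PySem.Dict.empty

-- 'for kw in keywords: if kw in first: return …'  (indices stored are in range, pyGetD exact)
def pvLookupB (words : List String) (first : PySem.Dict String Int) : List String → String
  | [] => "Unknown"
  | kw :: rest =>
      match first.get? kw with
      | some i => PySem.List.pyGetD words (i - 1) "" ++ " " ++ PySem.List.pyGetD words i ""
      | none => pvLookupB words first rest

def extract_enzyme_name_alt (text : String) : String :=
  pvLookupB (PySem.Str.split₀ text) (pvBuildB (PySem.Str.split₀ text)) pvKeywordsB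

-- ===== PRECONDITION & SPEC =====
def Spec_extract_enzyme_name (text : String) (out : String) : Prop := out = extract_enzyme_name_alt text
instance (text : String) (out : String) : Decidable (Spec_extract_enzyme_name text out) := by unfold Spec_extract_enzyme_name; infer_instance

-- ===== CLAIM (what is proved, stated in full; the proofs are below) =====
def Claim_equal_extract_enzyme_name : Prop := ∀ (text : String), Dom_extract_enzyme_name text → Spec_extract_enzyme_name text (extract_enzyme_name text)

-- ===== LEMMAS AND PROOFS =====

-- the per-keyword test both programs apply to an (index, word) pair
def pvPred (kw : String) (p : Int × String) : Bool :=
  PySem.Str.isIn kw (PySem.Str.lower p.2) && decide (0 < p.1)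

-- A's inner loop is find? of pvPred over the enumerated words
theorem pvInnerA_eq_find? (kw : String) (words : List String) (l : List (Int × String)) :
    pvInnerA kw words l =
      (l.find? (pvPred kw)).map (fun p => PySem.List.pyGetD words (p.1 - 1) "" ++ " " ++ p.2) := by
  induction l with
  | nil => rfl
  | cons p rest ih =>
    obtain ⟨i, word⟩ := p
    have hc : (PySem.Str.isIn kw (PySem.Str.lower word) && decide (0 < i)) = pvPred kw (i, word) := rfl
    rw [pvInnerA, hc]
    cases h : pvPred kw (i, word)
    · rw [List.find?_cons_of_neg (p := pvPred kw) (h := by simp [h]), if_neg Bool.false_ne_true, ih]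
    · rw [List.find?_cons_of_pos (p := pvPred kw) (h := h), if_pos rfl]
      rfl

-- invariant of split₀.go: every produced word is already in acc or an infix of what remains
theorem pv_go_mem (s : List Char) : ∀ (cur : List Char) (acc : List (List Char)) (w : List Char),
    w ∈ PySem.Chars.split₀.go s cur acc → w ∈ acc ∨ w <:+: (cur.reverse ++ s) := by
  induction s with
  | nil =>
    intro cur acc w h
    simp only [PySem.Chars.split₀.go] at h
    split_ifs at h with h1
    · exact Or.inl (List.mem_reverse.mp h)
    · rcases List.mem_cons.mp (List.mem_reverse.mp h) with h2 | h2
      · exact Or.inr (by rw [h2]; simp)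
      · exact Or.inl h2
  | cons c rest ih =>
    intro cur acc w h
    simp only [PySem.Chars.split₀.go] at h
    split_ifs at h with h1 h2
    · rcases ih [] acc w h with h3 | h3
      · exact Or.inl h3
      · refine Or.inr (h3.trans ?_)
        exact (List.suffix_append_of_suffix (List.suffix_cons c rest)).isInfix
    · rcases ih [] (cur.reverse :: acc) w h with h3 | h3
      · rcases List.mem_cons.mp h3 with h4 | h4
        · exact Or.inr (by rw [h4]; exact (List.prefix_append cur.reverse (c :: rest)).isInfix)
        · exact Or.inl h4
      · refine Or.inr (h3.trans ?_)
        exact (List.suffix_append_of_suffix (List.suffix_cons c rest)).isInfix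
    · rcases ih (c :: cur) acc w h with h3 | h3
      · exact Or.inl h3
      · refine Or.inr ?_
        simpa [List.append_assoc] using h3

-- every word produced by split₀ is an infix of the text (char level)
theorem pv_split₀_infix (s : List Char) (w : List Char) (h : w ∈ PySem.Chars.split₀ s) :
    w <:+: s := by
  rcases pv_go_mem s [] [] w h with h1 | h1
  · simp at h1
  · simpa using h1

-- if the keyword is not in text.lower(), no word of the split contains it
theorem pv_guard_none (kw text : String)
    (h : PySem.Str.isIn kw (PySem.Str.lower text) = false) :
    (PySem.List.enumerate (PySem.Str.split₀ text) 0).find? (pvPred kw) = none := by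
  rw [List.find?_eq_none]
  intro p hp
  obtain ⟨k, hk, rfl⟩ := (PySem.List.mem_enumerate_iff _ _ _).mp hp
  simp only [pvPred, Bool.not_eq_true, Bool.and_eq_false_iff]
  left
  have hw : (PySem.Str.split₀ text)[k] ∈ PySem.Str.split₀ text := List.getElem_mem hk
  have hwl : (PySem.Str.split₀ text)[k].toList ∈ PySem.Chars.split₀ text.toList := by
    rw [← PySem.Str.split₀_map_toList]
    exact List.mem_map_of_mem hw
  have hinf : (PySem.Str.split₀ text)[k].toList <:+: text.toList :=
    pv_split₀_infix _ _ hwl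
  rw [PySem.Str.isIn_eq, PySem.Str.toList_lower, PySem.Chars.isIn_eq_false_iff]
  intro hcon
  rw [PySem.Str.isIn_eq, PySem.Str.toList_lower, PySem.Chars.isIn_eq_false_iff] at h
  exact h (hcon.trans (by simpa [PySem.Chars.lower] using hinf.map (PySem.Chars.lowerChar)))

-- B's inner keyword loop never touches keys outside ks
theorem pvInner_skip (ks : List String) (wl : String) (i : Int)
    (d : PySem.Dict String Int) (kw : String) (hkw : kw ∉ ks) :
    (ks.foldl
        (fun d k => if !d.contains k && PySem.Str.isIn k wl then d.insert k i else d)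
        d).get? kw = d.get? kw := by
  induction ks generalizing d with
  | nil => rfl
  | cons k ks ih =>
    have hne : kw ≠ k := fun e => hkw (e ▸ List.mem_cons_self ..)
    rw [List.foldl_cons, ih _ (fun m => hkw (List.mem_cons_of_mem _ m))]
    split
    · exact PySem.Dict.get?_insert_of_ne _ _ hne
    · rfl

-- effect of B's inner keyword loop on the lookup of one of its keywords
theorem pvInner_get (ks : List String) (hnd : ks.Nodup) (wl : String) (i : Int)
    (d : PySem.Dict String Int) (kw : String) (hkw : kw ∈ ks) :
    (ks.foldl
        (fun d k => if !d.contains k && PySem.Str.isIn k wl then d.insert k i else d)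
        d).get? kw =
      if d.contains kw = false ∧ PySem.Str.isIn kw wl = true then some i
      else d.get? kw := by
  induction ks generalizing d with
  | nil => cases hkw
  | cons k ks ih =>
    rw [List.foldl_cons]
    rcases List.mem_cons.mp hkw with rfl | hmem
    · have hnotin : kw ∉ ks := (List.nodup_cons.mp hnd).1
      rw [pvInner_skip ks wl i _ kw hnotin]
      by_cases h1 : d.contains kw = false ∧ PySem.Str.isIn kw wl = true
      · rw [if_pos h1, if_pos (by simp only [h1.1, Bool.not_false, Bool.true_and]; exact h1.2),
          PySem.Dict.get?_insert_self]
      · rw [if_neg h1]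
        have : (!d.contains kw && PySem.Str.isIn kw wl) = false := by
          rcases Decidable.not_and_iff_not_or_not.mp h1 with h2 | h2 <;> simp at h2 <;> simp [h2]
        rw [this]
        simp
    · have hne : kw ≠ k := fun e => (List.nodup_cons.mp hnd).1 (e ▸ hmem)
      rw [ih (List.nodup_cons.mp hnd).2 _ hmem]
      have hc : (if !d.contains k && PySem.Str.isIn k wl then d.insert k i else d).contains kw = d.contains kw := by
        split
        · rw [PySem.Dict.contains_insert]; simp [hne]
        · rfl
      have hg : (if !d.contains k && PySem.Str.isIn k wl then d.insert k i else d).get? kw = d.get? kw := by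
        split
        · exact PySem.Dict.get?_insert_of_ne _ _ hne
        · rfl
      rw [hc, hg]

-- effect of B's whole indexing pass on the lookup of one keyword
theorem pvBuild_get (l : List (Int × String)) (d : PySem.Dict String Int) (kw : String)
    (hkw : kw ∈ pvKeywordsB) (hpos : ∀ p ∈ l, 0 ≤ p.1) :
    (l.foldl pvStepB d).get? kw = (d.get? kw).or ((l.find? (pvPred kw)).map (·.1)) := by
  induction l generalizing d with
  | nil => simp
  | cons p l ih =>
    rw [List.foldl_cons, ih _ (fun q hq => hpos q (List.mem_cons_of_mem _ hq))]
    by_cases hp0 : p.1 = 0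
    · have hstep : pvStepB d p = d := by rw [pvStepB, if_pos (by simp [hp0])]
      have hpred : pvPred kw p = false := by simp [pvPred, hp0]
      rw [hstep, List.find?_cons_of_neg (by simp [hpred])]
    · have hstep : pvStepB d p = pvKeywordsB.foldl
          (fun d k => if !d.contains k && PySem.Str.isIn k (PySem.Str.lower p.2) then d.insert k p.1 else d) d := by
        rw [pvStepB, if_neg (by simp [hp0])]
      have hppos : 0 < p.1 := lt_of_le_of_ne (hpos p (List.mem_cons_self ..)) (Ne.symm hp0)
      rw [hstep, pvInner_get pvKeywordsB (by decide) _ _ d kw hkw]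
      by_cases hct : d.contains kw = true
      · obtain ⟨v, hv⟩ := Option.isSome_iff_exists.mp (PySem.Dict.contains_eq_isSome_get? d kw ▸ hct)
        rw [if_neg (by simp [hct]), hv]
        simp
      · have hnone : d.get? kw = none := by
          rcases h : d.get? kw with _ | v
          · rfl
          · exact absurd (by rw [PySem.Dict.contains_eq_isSome_get?, h]; rfl) hct
        by_cases hin : PySem.Str.isIn kw (PySem.Str.lower p.2) = true
        · have hpred : pvPred kw p = true := by
            unfold pvPred; rw [hin, decide_eq_true hppos]; rfl
          rw [if_pos ⟨by simpa using hct, hin⟩, List.find?_cons_of_pos (h := hpred), hnone]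
          simp
        · have hin' : PySem.Str.isIn kw (PySem.Str.lower p.2) = false := by
            simpa using hin
          have hpred : pvPred kw p = false := by
            unfold pvPred; rw [hin']; rfl
          rw [if_neg (by rintro ⟨-, h⟩; exact hin h), List.find?_cons_of_neg (by simp [hpred]), hnone]

-- the two keyword loops agree, keyword by keyword
theorem pv_loops_eq (text : String) (ks : List String) (hks : ∀ kw ∈ ks, kw ∈ pvKeywordsB) :
    pvLoopA text ks =
      pvLookupB (PySem.Str.split₀ text) (pvBuildB (PySem.Str.split₀ text)) ks := by
  induction ks with
  | nil => rfl
  | cons kw rest ih =>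
    have hkw : kw ∈ pvKeywordsB := hks kw (List.mem_cons_self ..)
    have hpos : ∀ p ∈ PySem.List.enumerate (PySem.Str.split₀ text) 0, 0 ≤ p.1 := by
      intro p hp
      obtain ⟨k, hk, rfl⟩ := (PySem.List.mem_enumerate_iff _ _ _).mp hp
      simp
    have hget : (pvBuildB (PySem.Str.split₀ text)).get? kw =
        ((PySem.List.enumerate (PySem.Str.split₀ text) 0).find? (pvPred kw)).map (·.1) := by
      rw [pvBuildB, pvBuild_get _ _ kw hkw hpos, PySem.Dict.get?_empty]
      rfl
    rw [pvLoopA, pvLookupB, pvInnerA_eq_find?, hget]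
    cases hf : (PySem.List.enumerate (PySem.Str.split₀ text) 0).find? (pvPred kw) with
    | none =>
      simp only [Option.map_none]
      split_ifs <;> exact ih (fun k hk => hks k (List.mem_cons_of_mem _ hk))
    | some p =>
      by_cases hguard : PySem.Str.isIn kw (PySem.Str.lower text) = true
      · rw [if_pos hguard]
        simp only [Option.map_some]
        obtain ⟨k, hk, hpk⟩ := (PySem.List.mem_enumerate_iff _ _ _).mp (List.mem_of_find?_eq_some hf)
        have h2 : p.2 = PySem.List.pyGetD (PySem.Str.split₀ text) p.1 "" := by
          rw [hpk]
          simp only [zero_add]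
          rw [PySem.List.pyGetD_natCast, List.getD_eq_getElem _ _ hk]
        rw [← h2]
      · rw [pv_guard_none kw text (by simpa using hguard)] at hf
        cases hf

-- ===== VERDICT (by name: the statement is the Claim_ definition above) =====
theorem extract_enzyme_name_spec : Claim_equal_extract_enzyme_name := by
  intro text _
  show extract_enzyme_name text = extract_enzyme_name_alt text
  exact pv_loops_eq text pvKeywordsA (fun kw h => h)
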